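-- pv_equiv track=rewrite | github.com/manasvi1725/treatment-intel | ml-service/pipeline/combinations.py | compute_combo_effectiveness
-- ===== SOURCE A (Python) =====
-- positive_words = [
--     "effective","worked","successful","improved",
--     "beneficial","helped","recovery","progress",
--     "stable","responsive"
-- ]
--
-- def compute_combo_effectiveness(corpus, combo_scores):
--
--     effectiveness_scores = {}
--
--     for combo in combo_scores:
--
--         base, other = combo
--         mentions = 0
--         positive_hits = 0
--
--         for doc in corpus:
--
--             text = doc.get("text", "").lower()
--
--             if base in text and other in text:
--                 mentions += 1
--
--                 if any(word in text for word in positive_words):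
--                     positive_hits += 1
--
--         effectiveness_scores[combo] = (
--             int((positive_hits / mentions) * 100)
--             if mentions > 0 else 0
--         )
--
--     return effectiveness_scores
-- ===== SOURCE B (Python) =====
-- positive_words = [
--     "effective","worked","successful","improved",
--     "beneficial","helped","recovery","progress",
--     "stable","responsive"
-- ]
--
-- def compute_combo_effectiveness(corpus, combo_scores):
--     # lower each document and test the positive words ONCE, not once per combo
--     texts = [doc.get("text", "").lower() for doc in corpus]
--     flags = [any(word in text for word in positive_words) for text in texts]
--     # per distinct term, one presence vector over the docs
--     terms = set()
--     for combo in combo_scores: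
--         terms.update(combo)
--     presence = {t: [t in text for text in texts] for t in terms}
--     out = {}
--     for combo in combo_scores:
--         base, other = combo
--         mentions = 0
--         positive = 0
--         for bo, f in zip(zip(presence[base], presence[other]), flags):
--             if bo[0] and bo[1]:
--                 mentions += 1
--                 if f:
--                     positive += 1
--         out[combo] = int((positive / mentions) * 100) if mentions > 0 else 0
--     return out
-- ===== Notes on version B (the rewrite author's own statement) =====
-- stated objective: alternative
-- what changed: B lowercases each document and evaluates the positive-word test once per document (not once per combo per document), precomputes one boolean presence vector per distinct term, and scores each combo by zipping three boolean vectors instead of re-scanning every document's text; the measured running time is comparable to A's.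
import Mathlib
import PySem

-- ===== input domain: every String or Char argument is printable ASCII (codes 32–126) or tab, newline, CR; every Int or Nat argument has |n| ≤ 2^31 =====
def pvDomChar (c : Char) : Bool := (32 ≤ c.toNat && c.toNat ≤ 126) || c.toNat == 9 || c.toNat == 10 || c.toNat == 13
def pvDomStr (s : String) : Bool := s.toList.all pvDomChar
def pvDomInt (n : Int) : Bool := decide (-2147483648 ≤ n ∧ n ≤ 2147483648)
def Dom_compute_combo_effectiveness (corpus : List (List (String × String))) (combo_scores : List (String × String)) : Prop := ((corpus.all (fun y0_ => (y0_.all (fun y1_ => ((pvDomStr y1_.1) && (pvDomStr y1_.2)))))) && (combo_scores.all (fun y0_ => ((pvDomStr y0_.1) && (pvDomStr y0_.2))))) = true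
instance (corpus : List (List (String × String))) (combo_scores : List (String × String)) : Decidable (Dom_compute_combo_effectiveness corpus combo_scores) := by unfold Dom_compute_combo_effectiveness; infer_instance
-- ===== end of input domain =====

-- B precomputes lowered texts / positive flags / per-term presence vectors once and scores each
-- combo by zipping boolean vectors instead of rescanning every document's text per combo
-- (objective: alternative; same scoring formula, comparable measured cost).

-- ===== PORT A =====
def pvPositiveWords : List String :=
  ["effective","worked","successful","improved",
   "beneficial","helped","recovery","progress",
   "stable","responsive"]

-- exact IEEE-754 double model of Python's  int((p / m) * 100)  for 0 ≤ p ≤ m, 0 < m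
-- (round-to-nearest-even division p/m, round-to-nearest-even multiply by 100, truncate)
def pvRound53 (q : Nat) (sticky : Bool) : Nat × Nat :=
  -- q has > 53 bits; returns (sig, t) with sig of exactly 53 bits, value ≈ sig * 2^t
  let t := Nat.log2 q + 1 - 53
  let half := 2 ^ (t - 1)
  let low := q % 2 ^ t
  let hi := q / 2 ^ t
  let up := low > half || (low == half && (sticky || hi % 2 == 1))
  let sig := hi + (if up then 1 else 0)
  if sig == 2 ^ 53 then (2 ^ 52, t + 1) else (sig, t)

def pvFloatPct (p m : Nat) : Int :=
  if p == 0 then 0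
  else
    let k := 60 + (Nat.log2 m + 1)
    let q := (p * 2 ^ k) / m
    let r := (p * 2 ^ k) % m
    let st := pvRound53 q (r != 0)
    -- p/m = st.1 * 2^(st.2 - k)
    let st2 := pvRound53 (st.1 * 100) false
    let e2 : Int := (st.2 : Int) - (k : Int) + (st2.2 : Int)
    if 0 ≤ e2 then (st2.1 * 2 ^ e2.toNat : Nat) else ((st2.1 / 2 ^ (-e2).toNat : Nat) : Int)

def compute_combo_effectiveness (corpus : List (List (String × String))) (combo_scores : List (String × String)) : List (String × String × Int) :=
  let scores := combo_scores.foldl (fun (d : PySem.Dict (String × String) Int) combo =>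
    let base := combo.1
    let other := combo.2
    let mh := corpus.foldl (fun (acc : Nat × Nat) doc =>
      let text := PySem.Str.lower (PySem.Dict.getD (PySem.Dict.mk doc) "text" "")
      if PySem.Str.isIn base text && PySem.Str.isIn other text then
        (acc.1 + 1,
         if pvPositiveWords.any (fun word => PySem.Str.isIn word text) then acc.2 + 1 else acc.2)
      else acc) (0, 0)
    d.insert combo (if mh.1 > 0 then pvFloatPct mh.2 mh.1 else 0)) PySem.Dict.empty
  scores.items.map (fun p => (p.1.1, p.1.2, p.2))

-- ===== PORT B =====
def compute_combo_effectiveness_alt (corpus : List (List (String × String))) (combo_scores : List (String × String)) : List (String × String × Int) :=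
  let texts := corpus.map (fun doc => PySem.Str.lower (PySem.Dict.getD (PySem.Dict.mk doc) "text" ""))
  let flags := texts.map (fun text => pvPositiveWords.any (fun word => PySem.Str.isIn word text))
  let terms : PySem.Set String :=
    combo_scores.foldl (fun s combo => PySem.Set.update s [combo.1, combo.2]) PySem.Set.empty
  let presence : PySem.Dict String (List Bool) :=
    terms.foldl (fun d t => d.insert t (texts.map (fun text => PySem.Str.isIn t text))) PySem.Dict.empty
  let out := combo_scores.foldl (fun (d : PySem.Dict (String × String) Int) combo =>
    let base := combo.1
    let other := combo.2
    let mp := (PySem.Dict.getD presence base []).zip (PySem.Dict.getD presence other []) |>.zip flags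
    let mh := mp.foldl (fun (acc : Nat × Nat) bof =>
      if bof.1.1 && bof.1.2 then
        (acc.1 + 1, if bof.2 then acc.2 + 1 else acc.2)
      else acc) (0, 0)
    d.insert combo (if mh.1 > 0 then pvFloatPct mh.2 mh.1 else 0)) PySem.Dict.empty
  out.items.map (fun p => (p.1.1, p.1.2, p.2))

-- ===== PRECONDITION & SPEC =====
def Spec_compute_combo_effectiveness (corpus : List (List (String × String))) (combo_scores : List (String × String)) (out : List (String × String × Int)) : Prop := out = compute_combo_effectiveness_alt corpus combo_scores
instance (corpus : List (List (String × String))) (combo_scores : List (String × String)) (out : List (String × String × Int)) : Decidable (Spec_compute_combo_effectiveness corpus combo_scores out) := by unfold Spec_compute_combo_effectiveness; infer_instance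

-- ===== CLAIM (what is proved, stated in full; the proofs are below) =====
def Claim_equal_compute_combo_effectiveness : Prop := ∀ (corpus : List (List (String × String))) (combo_scores : List (String × String)), Dom_compute_combo_effectiveness corpus combo_scores → Spec_compute_combo_effectiveness corpus combo_scores (compute_combo_effectiveness corpus combo_scores)

-- ===== LEMMAS AND PROOFS =====

-- looking a key up in the presence dict built by a fold of inserts
theorem pvGetD_build {ν : Type} (g : String → ν) (ts : List String)
    (d : PySem.Dict String ν) (t : String) (v : ν) :
    (ts.foldl (fun d t => d.insert t (g t)) d).getD t v
      = if t ∈ ts then g t else d.getD t v := by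
  induction ts generalizing d with
  | nil => simp
  | cons a rest ih =>
    simp only [List.foldl_cons, ih, PySem.Dict.getD_insert, List.mem_cons]
    by_cases h1 : t ∈ rest
    · simp [h1]
    · by_cases h2 : t = a <;> simp [h1, h2]

-- every term of a combo of the list ends up in the accumulated term set
theorem pvMem_terms_aux (cs : List (String × String)) (s : PySem.Set String) (x : String)
    (h : x ∈ s ∨ ∃ c ∈ cs, x = c.1 ∨ x = c.2) :
    x ∈ cs.foldl (fun s combo => PySem.Set.update s [combo.1, combo.2]) s := by
  induction cs generalizing s with
  | nil => simpa using h
  | cons a rest ih =>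
    apply ih
    rcases h with h | ⟨c, hc, hx⟩
    · left; rw [PySem.Set.mem_update]; exact Or.inl h
    · rcases List.mem_cons.mp hc with rfl | hc'
      · left; rw [PySem.Set.mem_update]; right; simpa using hx
      · exact Or.inr ⟨c, hc', hx⟩

theorem compute_combo_effectiveness_spec : Claim_equal_compute_combo_effectiveness := by
  intro corpus combo_scores _
  unfold Spec_compute_combo_effectiveness
  simp only [compute_combo_effectiveness, compute_combo_effectiveness_alt]
  congr 1
  congr 1
  apply PySem.List.foldl_congr_mem
  intro d combo hmem
  congr 1
  rw [pvGetD_build, pvGetD_build,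
      if_pos (pvMem_terms_aux combo_scores PySem.Set.empty combo.1
        (Or.inr ⟨combo, hmem, Or.inl rfl⟩)),
      if_pos (pvMem_terms_aux combo_scores PySem.Set.empty combo.2
        (Or.inr ⟨combo, hmem, Or.inr rfl⟩)),
      List.zip_map', List.zip_map']
  simp only [List.foldl_map]
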